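-- pv_equiv track=rewrite | github.com/maykolaracayo22/scraping_noticias | backend_noticias/app/ai_analyzer.py | _analizar_sentimiento
-- ===== SOURCE A (Python) =====
-- def _analizar_sentimiento(titulo: str, contenido: str) -> str:
--     """Análisis básico de sentimiento"""
--     texto = f"{titulo} {contenido}".lower()
--
--     palabras_positivas = ['éxito', 'ganar', 'victoria', 'mejor', 'bueno', 'positivo', 'avance', 'progreso', 'feliz', 'alegría']
--     palabras_negativas = ['problema', 'muerte', 'accidente', 'tragedia', 'malo', 'negativo', 'conflicto', 'crisis', 'enfermedad', 'pérdida']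
--
--     positivos = sum(1 for palabra in palabras_positivas if palabra in texto)
--     negativos = sum(1 for palabra in palabras_negativas if palabra in texto)
--
--     if positivos > negativos + 2:
--         return "positivo"
--     elif negativos > positivos + 2:
--         return "negativo"
--     else:
--         return "neutral"
-- ===== SOURCE B (Python) =====
-- def _analizar_sentimiento(titulo: str, contenido: str) -> str:
--     """Analisis basico de sentimiento: un solo barrido sobre el texto.
--
--     En vez de buscar cada palabra clave por separado con `in`, indexa las
--     palabras por su letra inicial y recorre el texto UNA vez: en cada
--     posicion solo se prueban (con startswith) las palabras que empiezan
--     por ese caracter; cada palabra hallada se registra una sola vez en un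
--     conjunto y aporta su polaridad (+1/-1) a una puntuacion con signo.
--     """
--     texto = f"{titulo} {contenido}".lower()
--
--     positivas = ['éxito', 'ganar', 'victoria', 'mejor', 'bueno', 'positivo', 'avance', 'progreso', 'feliz', 'alegría']
--     negativas = ['problema', 'muerte', 'accidente', 'tragedia', 'malo', 'negativo', 'conflicto', 'crisis', 'enfermedad', 'pérdida']
--
--     entradas = [(p, 1) for p in positivas] + [(n, -1) for n in negativas]
--
--     por_inicial = {}
--     for palabra, pol in entradas:
--         por_inicial[palabra[0]] = por_inicial.get(palabra[0], []) + [(palabra, pol)]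
--
--     vistas = set()
--     score = 0
--     for i in range(len(texto)):
--         for palabra, pol in por_inicial.get(texto[i], []):
--             if palabra not in vistas and texto.startswith(palabra, i):
--                 vistas.add(palabra)
--                 score += pol
--
--     if score > 2:
--         return "positivo"
--     elif score < -2:
--         return "negativo"
--     else:
--         return "neutral"
-- ===== Notes on version B (the rewrite author's own statement) =====
-- stated objective: alternative
-- what changed: B replaces A's per-keyword substring searches and two category counts by a single left-to-right scan of the text: keywords are indexed by first letter, at each position only the keywords starting with that character are tested with startswith, each word found is recorded once in a seen-set and adds its +1/-1 polarity to one signed score classified by score > 2 / score < -2.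
import Mathlib
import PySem

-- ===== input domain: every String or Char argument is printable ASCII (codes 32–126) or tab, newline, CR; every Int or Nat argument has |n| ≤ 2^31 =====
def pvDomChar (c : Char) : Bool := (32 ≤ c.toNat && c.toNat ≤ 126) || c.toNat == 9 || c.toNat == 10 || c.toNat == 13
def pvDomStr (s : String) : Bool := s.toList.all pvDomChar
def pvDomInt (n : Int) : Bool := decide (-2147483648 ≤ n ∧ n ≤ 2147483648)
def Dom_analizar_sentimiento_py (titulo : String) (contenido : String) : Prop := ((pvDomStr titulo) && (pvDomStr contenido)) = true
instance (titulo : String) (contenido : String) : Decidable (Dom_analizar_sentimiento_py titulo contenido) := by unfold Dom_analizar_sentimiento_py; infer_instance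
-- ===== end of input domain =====

-- B replaces A's per-keyword substring searches and two category counts by a single
-- left-to-right scan of the text with a first-letter index of the keywords, a seen-set
-- and one signed score (objective: alternative algorithm, same result).

-- ===== PORT A =====
def pvPalabrasPositivas : List String :=
  ["éxito", "ganar", "victoria", "mejor", "bueno", "positivo", "avance", "progreso", "feliz", "alegría"]
def pvPalabrasNegativas : List String :=
  ["problema", "muerte", "accidente", "tragedia", "malo", "negativo", "conflicto", "crisis", "enfermedad", "pérdida"]

def analizar_sentimiento_py (titulo : String) (contenido : String) : String :=
  let texto := PySem.Str.lower (titulo ++ " " ++ contenido)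
  let positivos : Int := pvPalabrasPositivas.foldl (fun acc palabra => if PySem.Str.isIn palabra texto then acc + 1 else acc) 0
  let negativos : Int := pvPalabrasNegativas.foldl (fun acc palabra => if PySem.Str.isIn palabra texto then acc + 1 else acc) 0
  if positivos > negativos + 2 then "positivo"
  else if negativos > positivos + 2 then "negativo"
  else "neutral"

-- ===== PORT B =====
-- entradas = [(p, 1) for p in positivas] + [(n, -1) for n in negativas]
def pvEntradas : List (String × Int) :=
  pvPalabrasPositivas.map (fun p => (p, 1)) ++ pvPalabrasNegativas.map (fun n => (n, -1))

-- palabra[0]: every keyword is nonempty, so headD is exact here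
def pvInicial (w : String) : Char := w.toList.headD ' '

-- por_inicial[palabra[0]] = por_inicial.get(palabra[0], []) + [(palabra, pol)]
def pvPorInicial : PySem.Dict Char (List (String × Int)) :=
  pvEntradas.foldl (fun d wp => d.modify (pvInicial wp.1) [] (· ++ [wp])) PySem.Dict.empty

-- the position loop 'for i in range(len(texto))' as structural recursion over the
-- suffix texto[i:]: texto[i] is the suffix's head, and texto.startswith(palabra, i)
-- is PySem.Chars.startswith on that suffix — exact for 0 ≤ i < len(texto)
def pvBarrido (d : PySem.Dict Char (List (String × Int))) :
    List Char → PySem.Set String × Int → PySem.Set String × Int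
  | [], st => st
  | c :: rest, st =>
      pvBarrido d rest
        ((d.getD c []).foldl
          (fun st wp =>
            if !(PySem.Set.contains st.1 wp.1) && PySem.Chars.startswith (c :: rest) wp.1.toList
            then (PySem.Set.add st.1 wp.1, st.2 + wp.2) else st) st)

def analizar_sentimiento_py_alt (titulo : String) (contenido : String) : String :=
  let texto := PySem.Str.lower (titulo ++ " " ++ contenido)
  let st := pvBarrido pvPorInicial texto.toList ([], 0)
  if st.2 > 2 then "positivo"
  else if st.2 < -2 then "negativo"
  else "neutral"

-- ===== PRECONDITION & SPEC =====
def Spec_analizar_sentimiento_py (titulo : String) (contenido : String) (out : String) : Prop := out = analizar_sentimiento_py_alt titulo contenido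
instance (titulo : String) (contenido : String) (out : String) : Decidable (Spec_analizar_sentimiento_py titulo contenido out) := by unfold Spec_analizar_sentimiento_py; infer_instance

-- ===== CLAIM (what is proved, stated in full; the proofs are below) =====
def Claim_equal_analizar_sentimiento_py : Prop := ∀ (titulo : String) (contenido : String), Dom_analizar_sentimiento_py titulo contenido → Spec_analizar_sentimiento_py titulo contenido (analizar_sentimiento_py titulo contenido)

-- ===== LEMMAS AND PROOFS =====


theorem pv_isIn_cons (w : List Char) (c : Char) (rest : List Char) :
    PySem.Chars.isIn w (c :: rest) = (PySem.Chars.startswith (c :: rest) w || PySem.Chars.isIn w rest) := by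
  rw [Bool.eq_iff_iff]
  simp [PySem.Chars.isIn_iff_infix, PySem.Chars.startswith_iff, List.infix_cons_iff]

theorem pv_isIn_nil (w : List Char) (hne : w ≠ []) : PySem.Chars.isIn w [] = false := by
  cases h : PySem.Chars.isIn w []
  · rfl
  · have := (PySem.Chars.isIn_iff_infix _ _).mp h
    exact absurd (List.eq_nil_of_infix_nil this) hne

theorem pv_sw_head (w : List Char) (c : Char) (rest : List Char) (hne : w ≠ [])
    (h : PySem.Chars.startswith (c :: rest) w = true) : w.headD ' ' = c := by
  have := (PySem.Chars.startswith_iff _ _).mp h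
  rcases w with _ | ⟨d, w'⟩
  · exact absurd rfl hne
  · rcases this with ⟨t, ht⟩
    simp at ht ⊢
    exact ht.1

theorem pv_sum_split (l : List (String × Int)) (f g h : String × Int → Bool)
    (hpt : ∀ x ∈ l, (h x = (f x || g x)) ∧ (f x = true → g x = false)) :
    ((l.filter f).map (·.2)).sum + ((l.filter g).map (·.2)).sum = ((l.filter h).map (·.2)).sum := by
  induction l with
  | nil => simp
  | cons x l ih =>
    have hx := hpt x (by simp)
    have ihl := ih (fun y hy => hpt y (List.mem_cons_of_mem _ hy))
    simp only [List.filter_cons]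
    cases hf : f x <;> cases hg : g x <;>
      simp_all [hx.1] <;> omega

theorem pv_key_inj (l : List (String × Int)) (hnd : (l.map (·.1)).Nodup) :
    ∀ x ∈ l, ∀ y ∈ l, x.1 = y.1 → x = y := by
  induction l with
  | nil => simp
  | cons a l ih =>
    rw [List.map_cons, List.nodup_cons] at hnd
    intro x hx y hy hxy
    rcases List.mem_cons.mp hx with rfl | hx' <;> rcases List.mem_cons.mp hy with rfl | hy'
    · rfl
    · exact absurd (hxy ▸ List.mem_map_of_mem hy') hnd.1
    · exact absurd (hxy ▸ List.mem_map_of_mem hx') hnd.1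
    · exact ih hnd.2 x hx' y hy' hxy

-- the keyword table: distinct keys, all nonempty
theorem pv_keys_nodup : (pvEntradas.map (·.1)).Nodup := by decide
theorem pv_nonempty : ∀ wp ∈ pvEntradas, wp.1.toList ≠ [] := by decide

-- what the index lookup returns: the entries whose first letter is c, in order
theorem pv_getD_porInicial (c : Char) :
    pvPorInicial.getD c [] = pvEntradas.filter (fun wp => pvInicial wp.1 == c) := by
  have h : pvPorInicial
      = (pvEntradas.map (fun wp => (pvInicial wp.1, wp))).foldl
          (fun d p => d.modify p.1 [] (· ++ [p.2])) PySem.Dict.empty := by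
    rw [List.foldl_map]; rfl
  rw [h, PySem.Dict.getD_foldl_modify_append, PySem.Dict.getD_empty]
  rw [List.filter_map, List.map_map]
  simp [Function.comp_def]

-- the inner fold over the candidates at one position
theorem pv_inner_fold (s : List Char) :
    ∀ (m : List (String × Int)) (v : PySem.Set String) (sc : Int),
      (m.map (·.1)).Nodup →
      m.foldl
        (fun st wp =>
          if !(PySem.Set.contains st.1 wp.1) && PySem.Chars.startswith s wp.1.toList
          then (PySem.Set.add st.1 wp.1, st.2 + wp.2) else st) (v, sc)
      = (v ++ ((m.filter (fun wp => !(PySem.Set.contains v wp.1) && PySem.Chars.startswith s wp.1.toList)).map (·.1)),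
         sc + ((m.filter (fun wp => !(PySem.Set.contains v wp.1) && PySem.Chars.startswith s wp.1.toList)).map (·.2)).sum) := by
  intro m
  induction m with
  | nil => intro v sc _; simp
  | cons wp m' ih =>
    intro v sc hnd
    rw [List.map_cons, List.nodup_cons] at hnd
    simp only [List.foldl_cons]
    have hcong : ∀ (u : PySem.Set String), (∀ x ∈ m', PySem.Set.contains u x.1 = PySem.Set.contains v x.1) →
        m'.filter (fun wp' => !(PySem.Set.contains u wp'.1) && PySem.Chars.startswith s wp'.1.toList)
        = m'.filter (fun wp' => !(PySem.Set.contains v wp'.1) && PySem.Chars.startswith s wp'.1.toList) := by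
      intro u hu
      apply List.filter_congr
      intro x hx
      rw [hu x hx]
    by_cases hc : (!(PySem.Set.contains v wp.1) && PySem.Chars.startswith s wp.1.toList) = true
    · rw [if_pos hc]
      have hcv : PySem.Set.contains v wp.1 = false := by
        rcases Bool.and_eq_true .. |>.mp hc with ⟨h1, _⟩
        simpa using h1
      have hnm : wp.1 ∉ v := by
        intro hmem
        rw [(PySem.Set.contains_iff _ _).mpr hmem] at hcv
        exact Bool.true_eq_false ▸ hcv
      rw [PySem.Set.add_of_not_mem hnm, ih (v ++ [wp.1]) (sc + wp.2) hnd.2]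
      rw [hcong (v ++ [wp.1]) (fun x hx => by
        have hne : x.1 ≠ wp.1 := fun h => hnd.1 (h ▸ List.mem_map_of_mem hx)
        simp [hne])]
      simp only [List.filter_cons, hc, if_true, List.map_cons, List.sum_cons]
      refine Prod.ext ?_ ?_
      · simp [List.append_assoc]
      · simp; omega
    · rw [if_neg hc, ih v sc hnd.2]
      have hf : (!(PySem.Set.contains v wp.1) && PySem.Chars.startswith s wp.1.toList) = false :=
        Bool.not_eq_true _ ▸ eq_false_of_ne_true hc
      simp only [List.filter_cons, hf, Bool.false_eq_true, if_false]

-- the outer scan, score component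
theorem pv_barrido_score :
    ∀ (t : List Char) (v : PySem.Set String) (sc : Int),
      (pvBarrido pvPorInicial t (v, sc)).2 =
        sc + ((pvEntradas.filter (fun wp => !(PySem.Set.contains v wp.1) && PySem.Chars.isIn wp.1.toList t)).map (·.2)).sum := by
  intro t
  induction t with
  | nil =>
    intro v sc
    have h0 : pvEntradas.filter (fun wp => !(PySem.Set.contains v wp.1) && PySem.Chars.isIn wp.1.toList []) = [] := by
      rw [List.filter_eq_nil_iff]
      intro wp hwp
      rw [pv_isIn_nil _ (pv_nonempty wp hwp)]
      simp
    simp only [pvBarrido, h0]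
    simp
  | cons c rest ih =>
    intro v sc
    have hmnd : ((pvEntradas.filter (fun wp => pvInicial wp.1 == c)).map (·.1)).Nodup :=
      List.Nodup.sublist (List.filter_sublist.map _) pv_keys_nodup
    simp only [pvBarrido]
    rw [pv_getD_porInicial c, pv_inner_fold (c :: rest) _ v sc hmnd, ih]
    rw [List.filter_filter]
    set f : String × Int → Bool :=
      fun wp => (!(PySem.Set.contains v wp.1) && PySem.Chars.startswith (c :: rest) wp.1.toList) && (pvInicial wp.1 == c) with hfdef
    -- membership in the updated seen-set, pointwise on the table
    have hmem : ∀ wp ∈ pvEntradas,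
        PySem.Set.contains (v ++ (pvEntradas.filter f).map (·.1)) wp.1 = (PySem.Set.contains v wp.1 || f wp) := by
      intro wp hwp
      rw [Bool.eq_iff_iff]
      have hkey : wp.1 ∈ (pvEntradas.filter f).map (·.1) ↔ f wp = true := by
        constructor
        · intro hm
          rcases List.mem_map.mp hm with ⟨wq, hwq, hq1⟩
          have hqe := List.mem_filter.mp hwq
          have := pv_key_inj pvEntradas pv_keys_nodup wq hqe.1 wp hwp hq1
          exact this ▸ hqe.2
        · intro hf
          exact List.mem_map_of_mem (List.mem_filter.mpr ⟨hwp, hf⟩)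
      simp only [PySem.Set.contains_eq_listContains, List.contains_eq_mem, decide_eq_true_eq,
        List.mem_append, Bool.or_eq_true]
      rw [hkey]
    -- rewrite the recursive sum's filter to a closed pointwise form
    have hcong : pvEntradas.filter (fun wp => !(PySem.Set.contains (v ++ (pvEntradas.filter f).map (·.1)) wp.1) && PySem.Chars.isIn wp.1.toList rest)
        = pvEntradas.filter (fun wp => !(PySem.Set.contains v wp.1 || f wp) && PySem.Chars.isIn wp.1.toList rest) := by
      apply List.filter_congr
      intro wp hwp
      rw [hmem wp hwp]
    rw [hcong]
    have hsplit := pv_sum_split pvEntradas f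
      (fun wp => !(PySem.Set.contains v wp.1 || f wp) && PySem.Chars.isIn wp.1.toList rest)
      (fun wp => !(PySem.Set.contains v wp.1) && PySem.Chars.isIn wp.1.toList (c :: rest)) ?_
    · omega
    · intro wp hwp
      have hne := pv_nonempty wp hwp
      have hic : PySem.Chars.startswith (c :: rest) wp.1.toList = true → (pvInicial wp.1 == c) = true := by
        intro hs
        simp only [beq_iff_eq, pvInicial]
        exact pv_sw_head _ _ _ hne hs
      simp only [hfdef, pv_isIn_cons]
      cases hcv : PySem.Set.contains v wp.1 <;>
        cases hsw : PySem.Chars.startswith (c :: rest) wp.1.toList <;>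
          cases hin : PySem.Chars.isIn wp.1.toList rest <;> simp_all

theorem analizar_sentimiento_py_eq (titulo contenido : String) :
    analizar_sentimiento_py titulo contenido = analizar_sentimiento_py_alt titulo contenido := by
  unfold analizar_sentimiento_py analizar_sentimiento_py_alt
  set t := PySem.Str.lower (titulo ++ " " ++ contenido) with ht
  have hscore := pv_barrido_score t.toList [] 0
  have hfil : pvEntradas.filter (fun wp => !(PySem.Set.contains [] wp.1) && PySem.Chars.isIn wp.1.toList t.toList)
      = pvEntradas.filter (fun wp => PySem.Str.isIn wp.1 t) := by
    apply List.filter_congr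
    intro wp _
    simp [PySem.Set.contains_eq_listContains]
  rw [hfil] at hscore
  have hpos := PySem.List.foldl_if_add_one (fun palabra => PySem.Str.isIn palabra t) pvPalabrasPositivas (0 : Int)
  have hneg := PySem.List.foldl_if_add_one (fun palabra => PySem.Str.isIn palabra t) pvPalabrasNegativas (0 : Int)
  have hsum : ((pvEntradas.filter (fun wp => PySem.Str.isIn wp.1 t)).map (·.2)).sum
      = (pvPalabrasPositivas.countP (fun w => PySem.Str.isIn w t) : Int)
        - (pvPalabrasNegativas.countP (fun w => PySem.Str.isIn w t) : Int) := by
    rw [pvEntradas, List.filter_append, List.map_append, List.sum_append,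
      List.filter_map, List.filter_map, List.map_map, List.map_map]
    simp only [Function.comp_def]
    rw [List.countP_eq_length_filter, List.countP_eq_length_filter]
    simp
    omega
  rw [hsum] at hscore
  simp only [hscore, hpos, hneg]
  split_ifs <;> first | rfl | omega

-- ===== VERDICT (by name: the statement is the Claim_ definition above) =====
theorem analizar_sentimiento_py_spec : Claim_equal_analizar_sentimiento_py := by
  intro titulo contenido _
  exact analizar_sentimiento_py_eq titulo contenido
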